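-- pv_equiv track=rewrite | github.com/gereleth/aoc_python | src/year2024/day23.py | part1
-- ===== SOURCE A (Python) =====
-- from collections import defaultdict
--
-- def part1(text_input: str) -> int:
--     edges = [line.split("-") for line in text_input.split("\n")]
--     neighbors = defaultdict(set)
--     for a, b in edges:
--         neighbors[a].add(b)
--         neighbors[b].add(a)
--     triplets = set()
--     for a, neighbors_a in neighbors.items():
--         if not a.startswith("t"):
--             continue
--         for b in neighbors_a:
--             common_cs = neighbors[b].intersection(neighbors_a)
--             for c in common_cs:
--                 triplets.add(tuple(sorted((a, b, c))))
--     return len(triplets)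
-- ===== SOURCE B (Python) =====
-- def part1(text_input: str) -> int:
--     # Canonical edge set + sorted vertex list; count increasing triples directly.
--     edge = set()
--     verts = set()
--     for line in text_input.split("\n"):
--         a, b = line.split("-")
--         edge.add((a, b) if a < b else (b, a))
--         verts.add(a)
--         verts.add(b)
--     vs = sorted(verts)
--     count = 0
--     rest1 = vs
--     while rest1:
--         u = rest1[0]
--         rest1 = rest1[1:]
--         rest2 = rest1
--         while rest2:
--             v = rest2[0]
--             rest2 = rest2[1:]
--             if (u, v) not in edge:
--                 continue
--             for w in rest2:
--                 if (u, w) in edge and (v, w) in edge and \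
--                         (u.startswith("t") or v.startswith("t") or w.startswith("t")):
--                     count += 1
--     return count
-- ===== Notes on version B (the rewrite author's own statement) =====
-- stated objective: alternative
-- what changed: A builds a per-node adjacency-set map, walks each t-node's neighborhood with a set-intersection pass and dedups sorted tuples in a set; B instead builds a canonical (min,max) edge set plus a sorted vertex list and directly counts increasing vertex triples u<v<w whose three edges exist and that touch a t-node with a plain integer counter, so there is no adjacency map, no intersection and no dedup set.
-- intended difference: On inputs containing a self-loop line x-x where x starts with 't' or x shares an edge with a 't'-node, A counts degenerate 'triangles' with repeated vertices (e.g. 1 for 'ta-ta'), while B counts only proper triangles with three distinct vertices (0 there), which is the intended triangle count. — e.g. on part1("ta-ta"): A returns 1, B returns 0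
import Mathlib
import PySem

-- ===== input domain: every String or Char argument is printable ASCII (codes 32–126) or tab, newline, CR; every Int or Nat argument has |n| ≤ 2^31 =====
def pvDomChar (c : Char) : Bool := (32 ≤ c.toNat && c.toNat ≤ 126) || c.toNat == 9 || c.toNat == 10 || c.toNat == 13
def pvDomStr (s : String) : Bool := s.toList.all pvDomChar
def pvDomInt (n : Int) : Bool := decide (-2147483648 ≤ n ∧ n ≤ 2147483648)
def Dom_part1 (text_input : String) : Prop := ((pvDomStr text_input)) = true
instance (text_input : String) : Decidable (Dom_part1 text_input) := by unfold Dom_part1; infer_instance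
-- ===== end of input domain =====

-- B drops A's adjacency map, per-t-node intersection pass and dedup set: it builds a canonical
-- (min,max) edge set plus a sorted vertex list and counts increasing vertex triples u<v<w whose
-- three edges exist and that touch a 't'-node with a plain integer counter (objective: alternative).

-- s.split(sep) for a nonempty literal sep (split? is none only for sep = "")
def pySplit (s sep : String) : List String := (PySem.Str.split? s sep).getD []

-- tuple(sorted((a, b, c))) — A builds triangle keys this way
def sort3 (a b c : String) : String × String × String :=
  match PySem.List.sorted [a, b, c] (fun x => x) false with
  | [x, y, z] => (x, y, z)
  | _ => (a, b, c)   -- unreachable: sorted preserves length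

-- ===== PORT A =====
def part1 (text_input : String) : Int :=
  let edges := (pySplit text_input "\n").map (fun line => pySplit line "-")
  let neighbors : PySem.Dict String (PySem.Set String) :=
    edges.foldl (fun d e =>
      match e with
      | [a, b] => (d.modify a PySem.Set.empty (fun s => PySem.Set.add s b)).modify b
          PySem.Set.empty (fun s => PySem.Set.add s a)
      | _ => d   -- a line that does not split in exactly two raises ValueError: outside Pre_part1
      ) PySem.Dict.empty
  let triplets : PySem.Set (String × String × String) :=
    neighbors.items.foldl (fun tr p =>
      if PySem.Str.startswith p.1 "t" then
        p.2.foldl (fun tr b =>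
          (PySem.Set.inter (neighbors.getD b PySem.Set.empty) p.2).foldl
            (fun tr c => PySem.Set.add tr (sort3 p.1 b c)) tr) tr
      else tr) PySem.Set.empty
  (triplets.length : Int)

-- ===== PORT B =====
-- 'a, b = line.split("-"); edge.add((a,b) if a<b else (b,a)); verts.add(a); verts.add(b)'
def bStep (st : PySem.Set (String × String) × PySem.Set String) (e : List String) :
    PySem.Set (String × String) × PySem.Set String :=
  match e with
  | [a, b] => (PySem.Set.add st.1 (if a < b then (a, b) else (b, a)),
               PySem.Set.add (PySem.Set.add st.2 a) b)
  | _ => st   -- outside Pre_part1 (ValueError in Python)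

def bLine (st : PySem.Set (String × String) × PySem.Set String) (line : String) :
    PySem.Set (String × String) × PySem.Set String :=
  bStep st (pySplit line "-")

-- 'for w in rest2: if (u,w) in edge and (v,w) in edge and (t-test): count += 1'
def bInner (edge : PySem.Set (String × String)) (u v : String) (ws : List String) (c : Int) : Int :=
  ws.foldl (fun c w =>
    if PySem.Set.contains edge (u, w) && PySem.Set.contains edge (v, w) &&
        (PySem.Str.startswith u "t" || PySem.Str.startswith v "t" || PySem.Str.startswith w "t")
    then c + 1 else c) c

-- 'while rest2: v = rest2[0]; rest2 = rest2[1:]; if (u,v) not in edge: continue; …'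
def bMid (edge : PySem.Set (String × String)) (u : String) :
    List String → Int → Int
  | [], c => c
  | v :: rest, c =>
      bMid edge u rest (if PySem.Set.contains edge (u, v) then bInner edge u v rest c else c)

-- 'while rest1: u = rest1[0]; rest1 = rest1[1:]; …'
def bOuter (edge : PySem.Set (String × String)) : List String → Int → Int
  | [], c => c
  | u :: rest, c => bOuter edge rest (bMid edge u rest c)

def part1_alt (text_input : String) : Int :=
  let st := (pySplit text_input "\n").foldl bLine
    ((PySem.Set.empty : PySem.Set (String × String)), (PySem.Set.empty : PySem.Set String))
  bOuter st.1 (PySem.List.sorted st.2 (fun x => x) false) 0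

-- ===== PRECONDITION & SPEC =====
-- Pre_ excludes only inputs where A raises ValueError: a line whose split on "-" does not have exactly 2 parts.
def Pre_part1 (text_input : String) : Prop :=
  ∀ line ∈ pySplit text_input "\n", (pySplit line "-").length = 2

instance (text_input : String) : Decidable (Pre_part1 text_input) := by
  unfold Pre_part1; infer_instance

def pvWitness_part1 : String := "ta-co\nta-de\nco-de"

-- the (first, second) parts of each line split on "-"
def pvEdges (text_input : String) : List (String × String) :=
  (pySplit text_input "\n").map (fun l => ((pySplit l "-").getD 0 "", (pySplit l "-").getD 1 ""))

-- s.startswith("t")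
def pvT (s : String) : Prop := PySem.Str.startswith s "t" = true

-- On inputs with a self-loop line x-x where x is 't'-prefixed or x shares an edge with a
-- 't'-prefixed node, A counts degenerate 'triangles' with repeated vertices (1 for "ta-ta"),
-- while B counts only proper triangles with three distinct vertices (0 there), the intended count.
def D_part1 (text_input : String) : Prop :=
  ∃ e ∈ pvEdges text_input, e.1 = e.2 ∧
    (pvT e.1 ∨ ∃ f ∈ pvEdges text_input, (f.1 = e.1 ∧ pvT f.2) ∨ (f.2 = e.1 ∧ pvT f.1))

instance (text_input : String) : Decidable (D_part1 text_input) := by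
  unfold D_part1 pvT; infer_instance

def Spec_part1 (text_input : String) (out : Int) : Prop :=
  ¬ D_part1 text_input → out = part1_alt text_input
instance (text_input : String) (out : Int) : Decidable (Spec_part1 text_input out) := by
  unfold Spec_part1; infer_instance

def pvDiffWitness_part1 : String := "ta-ta"
def pvDiffWitnessOut_part1 : Int × Int := (1, 0)

-- ===== CLAIM (what is proved, stated in full; the proofs are below) =====
def Claim_unchanged_part1 : Prop := ∀ (text_input : String), Dom_part1 text_input →
  Pre_part1 text_input → Spec_part1 text_input (part1 text_input)

def Claim_changed_part1 : Prop := Dom_part1 (pvDiffWitness_part1) ∧ Pre_part1 (pvDiffWitness_part1) ∧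
  D_part1 (pvDiffWitness_part1) ∧ part1 (pvDiffWitness_part1) = pvDiffWitnessOut_part1.1 ∧
  part1_alt (pvDiffWitness_part1) = pvDiffWitnessOut_part1.2 ∧
  pvDiffWitnessOut_part1.1 ≠ pvDiffWitnessOut_part1.2

def Claim_exact_part1 : Prop := ∀ (text_input : String), Dom_part1 text_input →
  Pre_part1 text_input → D_part1 text_input → part1 text_input ≠ part1_alt text_input

-- ===== LEMMAS AND PROOFS =====

-- notation-free shorthands used only by the proofs
def tsb (s : String) : Bool := PySem.Str.startswith s "t"

def buildStep (d : PySem.Dict String (PySem.Set String)) (e : List String) :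
    PySem.Dict String (PySem.Set String) :=
  match e with
  | [a, b] => (d.modify a PySem.Set.empty (fun s => PySem.Set.add s b)).modify b
      PySem.Set.empty (fun s => PySem.Set.add s a)
  | _ => d

def edgesOf (t : String) : List (List String) := (pySplit t "\n").map (fun line => pySplit line "-")

def buildD (t : String) : PySem.Dict String (PySem.Set String) :=
  (edgesOf t).foldl buildStep PySem.Dict.empty

def NB (d : PySem.Dict String (PySem.Set String)) (x : String) : PySem.Set String :=
  d.getD x PySem.Set.empty

def genA (d : PySem.Dict String (PySem.Set String)) (p : String × PySem.Set String) :
    List (String × String × String) :=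
  if tsb p.1 then
    p.2.flatMap (fun b => (PySem.Set.inter (NB d b) p.2).map (fun c => sort3 p.1 b c))
  else []

def candA (d : PySem.Dict String (PySem.Set String)) : List (String × String × String) :=
  d.items.flatMap (genA d)

-- B-side proof shorthands
def bSt (t : String) : PySem.Set (String × String) × PySem.Set String :=
  (edgesOf t).foldl bStep (PySem.Set.empty, PySem.Set.empty)

def predB (edge : PySem.Set (String × String)) (u v w : String) : Bool :=
  PySem.Set.contains edge (u, w) && PySem.Set.contains edge (v, w) &&
    (PySem.Str.startswith u "t" || PySem.Str.startswith v "t" || PySem.Str.startswith w "t")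

def tripsFrom (edge : PySem.Set (String × String)) (u : String) :
    List String → List (String × String × String)
  | [] => []
  | v :: rest =>
      (if PySem.Set.contains edge (u, v) then
        (rest.filter (predB edge u v)).map (fun w => (u, v, w))
      else []) ++ tripsFrom edge u rest

def trips (edge : PySem.Set (String × String)) : List String → List (String × String × String)
  | [] => []
  | u :: rest => tripsFrom edge u rest ++ trips edge rest

-- ---- generic fold shape ----
theorem foldl_update_flatMap {α β : Type} [BEq β] (g : α → List β) (l : List α) (s : PySem.Set β) :
    l.foldl (fun s e => PySem.Set.update s (g e)) s = PySem.Set.update s (l.flatMap g) := by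
  induction l generalizing s with
  | nil => simp [PySem.Set.update_nil]
  | cons e l ih => simp [List.flatMap_cons, PySem.Set.update_append, ih]

-- ---- normalization of port A ----
theorem inner_add_eq (d : PySem.Dict String (PySem.Set String)) (p : String × PySem.Set String)
    (b : String) (tr : PySem.Set (String × String × String)) :
    (PySem.Set.inter (d.getD b PySem.Set.empty) p.2).foldl
        (fun tr c => PySem.Set.add tr (sort3 p.1 b c)) tr
      = PySem.Set.update tr ((PySem.Set.inter (NB d b) p.2).map (fun c => sort3 p.1 b c)) :=
  (PySem.Set.update_map_eq_foldl_add _ _ _).symm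

theorem tripletsA_eq (d : PySem.Dict String (PySem.Set String)) :
    d.items.foldl (fun tr p =>
      if PySem.Str.startswith p.1 "t" then
        p.2.foldl (fun tr b =>
          (PySem.Set.inter (d.getD b PySem.Set.empty) p.2).foldl
            (fun tr c => PySem.Set.add tr (sort3 p.1 b c)) tr) tr
      else tr) PySem.Set.empty = PySem.Set.ofList (candA d) := by
  have hstep : (fun (tr : PySem.Set (String × String × String)) (p : String × PySem.Set String) =>
      if PySem.Str.startswith p.1 "t" then
        p.2.foldl (fun tr b =>
          (PySem.Set.inter (d.getD b PySem.Set.empty) p.2).foldl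
            (fun tr c => PySem.Set.add tr (sort3 p.1 b c)) tr) tr
      else tr) = fun tr p => PySem.Set.update tr (genA d p) := by
    funext tr p
    by_cases hts : PySem.Str.startswith p.1 "t"
    · simp only [genA, tsb, hts, if_true, inner_add_eq d p, foldl_update_flatMap]
    · simp only [genA, tsb, hts, Bool.false_eq_true, if_false, PySem.Set.update_nil]
  rw [hstep, foldl_update_flatMap, candA, PySem.Set.update_empty]

theorem part1_eq (t : String) :
    part1 t = ((PySem.Set.ofList (candA (buildD t))).length : Int) := by
  have h : part1 t = (((buildD t).items.foldl (fun tr p =>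
      if PySem.Str.startswith p.1 "t" then
        p.2.foldl (fun tr b =>
          (PySem.Set.inter ((buildD t).getD b PySem.Set.empty) p.2).foldl
            (fun tr c => PySem.Set.add tr (sort3 p.1 b c)) tr) tr
      else tr) PySem.Set.empty).length : Int) := rfl
  rw [h, tripletsA_eq]

-- ---- normalization of port B ----
theorem bInner_eq (edge : PySem.Set (String × String)) (u v : String) (ws : List String)
    (c : Int) : bInner edge u v ws c = c + ((ws.filter (predB edge u v)).length : Int) := by
  induction ws generalizing c with
  | nil => simp [bInner]
  | cons w ws ih =>
      show bInner edge u v ws (if predB edge u v w then c + 1 else c) = _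
      rw [ih]
      by_cases h : predB edge u v w = true
      · rw [if_pos h, List.filter_cons_of_pos h, List.length_cons]
        push_cast
        ring
      · rw [if_neg h, List.filter_cons_of_neg h]

theorem bMid_eq (edge : PySem.Set (String × String)) (u : String) (rest : List String)
    (c : Int) : bMid edge u rest c = c + ((tripsFrom edge u rest).length : Int) := by
  induction rest generalizing c with
  | nil => simp [bMid, tripsFrom]
  | cons v rest ih =>
      rw [bMid, ih, tripsFrom]
      by_cases h : PySem.Set.contains edge (u, v) = true
      · rw [if_pos h, if_pos h, bInner_eq, List.length_append, List.length_map]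
        push_cast
        ring
      · rw [if_neg h, if_neg h, List.length_append]
        simp

theorem bOuter_eq (edge : PySem.Set (String × String)) (vs : List String) (c : Int) :
    bOuter edge vs c = c + ((trips edge vs).length : Int) := by
  induction vs generalizing c with
  | nil => simp [bOuter, trips]
  | cons u rest ih =>
      rw [bOuter, ih, bMid_eq, trips]
      simp
      push_cast
      ring

theorem part1_alt_eq (t : String) :
    part1_alt t
      = ((trips (bSt t).1 (PySem.List.sorted (bSt t).2 (fun x => x) false)).length : Int) := by
  have hb : (pySplit t "\n").foldl bLine
      ((PySem.Set.empty : PySem.Set (String × String)), (PySem.Set.empty : PySem.Set String))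
      = bSt t := by
    unfold bSt edgesOf bLine
    rw [List.foldl_map]
  show bOuter _ _ 0 = _
  rw [hb, bOuter_eq]
  simp

-- ---- graph facts about the built dictionary (A side) ----
theorem mem_NB_buildStep (d : PySem.Dict String (PySem.Set String)) (a b x y : String) :
    y ∈ NB (buildStep d [a, b]) x ↔ y ∈ NB d x ∨ (x = a ∧ y = b) ∨ (x = b ∧ y = a) := by
  show y ∈ ((d.modify a PySem.Set.empty (fun s => PySem.Set.add s b)).modify b
      PySem.Set.empty (fun s => PySem.Set.add s a)).getD x PySem.Set.empty ↔ _
  rw [PySem.Dict.getD_modify]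
  by_cases hxb : x = b
  · subst hxb
    rw [if_pos rfl, PySem.Dict.getD_modify]
    by_cases hxa : x = a
    · subst hxa
      rw [if_pos rfl]
      simp only [PySem.Set.mem_add, NB]
      tauto
    · rw [if_neg hxa]
      simp only [PySem.Set.mem_add, NB]
      tauto
  · rw [if_neg hxb, PySem.Dict.getD_modify]
    by_cases hxa : x = a
    · subst hxa
      rw [if_pos rfl]
      simp only [PySem.Set.mem_add, NB]
      tauto
    · rw [if_neg hxa]
      simp only [NB]
      tauto

theorem mem_NB_foldl (es : List (List String)) (d : PySem.Dict String (PySem.Set String))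
    (hv : ∀ e ∈ es, e.length = 2) (x y : String) :
    y ∈ NB (es.foldl buildStep d) x ↔ y ∈ NB d x ∨ ∃ e ∈ es, e = [x, y] ∨ e = [y, x] := by
  induction es generalizing d with
  | nil => simp
  | cons e rest ih =>
      obtain ⟨a, b, rfl⟩ : ∃ a b, e = [a, b] := by
        have h2 := hv e (List.mem_cons_self)
        rcases e with _ | ⟨a, _ | ⟨b, _ | ⟨c, e⟩⟩⟩ <;> simp_all
      rw [List.foldl_cons, ih _ (fun e he => hv e (List.mem_cons_of_mem _ he)),
        mem_NB_buildStep]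
      simp only [List.mem_cons]
      constructor <;> aesop

theorem nodup_keys_foldl (es : List (List String)) (d : PySem.Dict String (PySem.Set String))
    (h : d.keys.Nodup) : (es.foldl buildStep d).keys.Nodup := by
  induction es generalizing d with
  | nil => exact h
  | cons e rest ih =>
      apply ih
      rcases e with _ | ⟨a, _ | ⟨b, _ | ⟨c, e⟩⟩⟩ <;> try exact h
      show (((d.modify a PySem.Set.empty (fun s => PySem.Set.add s b)).modify b
          PySem.Set.empty (fun s => PySem.Set.add s a)).keys).Nodup
      rw [PySem.Dict.keys_modify]
      apply PySem.Dict.nodup_keys_insert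
      rw [PySem.Dict.keys_modify]
      exact PySem.Dict.nodup_keys_insert _ _ _ h

theorem edgesOf_shape (t : String) (hpre : Pre_part1 t) :
    ∀ e ∈ edgesOf t, e.length = 2 := by
  intro e he
  obtain ⟨line, hline, rfl⟩ := List.mem_map.mp he
  exact hpre line hline

theorem mem_NB_build (t : String) (hpre : Pre_part1 t) (x y : String) :
    y ∈ NB (buildD t) x ↔ ∃ e ∈ edgesOf t, e = [x, y] ∨ e = [y, x] := by
  unfold buildD
  rw [mem_NB_foldl _ _ (edgesOf_shape t hpre)]
  simp [NB, PySem.Dict.getD_empty, PySem.Set.empty]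

theorem NB_symm (t : String) (hpre : Pre_part1 t) (x y : String)
    (h : y ∈ NB (buildD t) x) : x ∈ NB (buildD t) y := by
  rw [mem_NB_build t hpre] at h ⊢
  obtain ⟨e, he, hor⟩ := h
  exact ⟨e, he, hor.symm⟩

theorem nodup_keys_build (t : String) : (buildD t).keys.Nodup := by
  apply nodup_keys_foldl
  simp [PySem.Dict.keys_empty]

theorem items_val (t : String) {a : String} {na : PySem.Set String}
    (h : (a, na) ∈ (buildD t).items) : na = NB (buildD t) a :=
  (PySem.Dict.getD_of_mem_items _ h (nodup_keys_build t) PySem.Set.empty).symm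

theorem mem_items_of_NB (t : String) {x y : String} (h : y ∈ NB (buildD t) x) :
    (x, NB (buildD t) x) ∈ (buildD t).items := by
  have hk : x ∈ (buildD t).keys := by
    by_contra hk
    have := (PySem.Dict.get?_eq_none_iff_not_mem_keys (buildD t) x).mpr hk
    rw [NB, PySem.Dict.getD_eq_get?_getD, this] at h
    simp [PySem.Set.empty] at h
  rw [PySem.Dict.items_eq_map_keys _ (nodup_keys_build t) PySem.Set.empty]
  exact List.mem_map.mpr ⟨x, hk, rfl⟩

-- ---- facts about B's edge set and vertex set ----
theorem mem_bE_foldl (es : List (List String))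
    (st : PySem.Set (String × String) × PySem.Set String)
    (hv : ∀ e ∈ es, e.length = 2) (p : String × String) :
    p ∈ (es.foldl bStep st).1 ↔
      p ∈ st.1 ∨ ∃ e ∈ es, ∃ a b, e = [a, b] ∧ p = (if a < b then (a, b) else (b, a)) := by
  induction es generalizing st with
  | nil => simp
  | cons e rest ih =>
      obtain ⟨a, b, rfl⟩ : ∃ a b, e = [a, b] := by
        have h2 := hv e (List.mem_cons_self)
        rcases e with _ | ⟨a, _ | ⟨b, _ | ⟨c, e⟩⟩⟩ <;> simp_all
      rw [List.foldl_cons, ih _ (fun e he => hv e (List.mem_cons_of_mem _ he))]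
      show p ∈ PySem.Set.add st.1 _ ∨ _ ↔ _
      rw [PySem.Set.mem_add]
      constructor
      · rintro ((h | h) | ⟨e, he, a', b', rfl, hp⟩)
        · exact Or.inl h
        · exact Or.inr ⟨[a, b], List.mem_cons_self, a, b, rfl, h⟩
        · exact Or.inr ⟨_, List.mem_cons_of_mem _ he, a', b', rfl, hp⟩
      · rintro (h | ⟨e, he, a', b', rfl, hp⟩)
        · exact Or.inl (Or.inl h)
        · rcases List.mem_cons.mp he with heq | he'
          · obtain ⟨rfl, rfl⟩ : a' = a ∧ b' = b := by
              simpa using heq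
            exact Or.inl (Or.inr hp)
          · exact Or.inr ⟨_, he', a', b', rfl, hp⟩

theorem mem_bV_foldl (es : List (List String))
    (st : PySem.Set (String × String) × PySem.Set String)
    (hv : ∀ e ∈ es, e.length = 2) (x : String) :
    x ∈ (es.foldl bStep st).2 ↔
      x ∈ st.2 ∨ ∃ e ∈ es, ∃ a b, e = [a, b] ∧ (x = a ∨ x = b) := by
  induction es generalizing st with
  | nil => simp
  | cons e rest ih =>
      obtain ⟨a, b, rfl⟩ : ∃ a b, e = [a, b] := by
        have h2 := hv e (List.mem_cons_self)
        rcases e with _ | ⟨a, _ | ⟨b, _ | ⟨c, e⟩⟩⟩ <;> simp_all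
      rw [List.foldl_cons, ih _ (fun e he => hv e (List.mem_cons_of_mem _ he))]
      show x ∈ PySem.Set.add (PySem.Set.add st.2 a) b ∨ _ ↔ _
      rw [PySem.Set.mem_add, PySem.Set.mem_add]
      constructor
      · rintro (((h | h) | h) | ⟨e, he, a', b', rfl, hp⟩)
        · exact Or.inl h
        · exact Or.inr ⟨[a, b], List.mem_cons_self, a, b, rfl, Or.inl h⟩
        · exact Or.inr ⟨[a, b], List.mem_cons_self, a, b, rfl, Or.inr h⟩
        · exact Or.inr ⟨_, List.mem_cons_of_mem _ he, a', b', rfl, hp⟩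
      · rintro (h | ⟨e, he, a', b', rfl, hp⟩)
        · exact Or.inl (Or.inl (Or.inl h))
        · rcases List.mem_cons.mp he with heq | he'
          · obtain ⟨rfl, rfl⟩ : a' = a ∧ b' = b := by
              simpa using heq
            rcases hp with h | h
            · exact Or.inl (Or.inl (Or.inr h))
            · exact Or.inl (Or.inr h)
          · exact Or.inr ⟨_, he', a', b', rfl, hp⟩

theorem mem_bE_lt (t : String) (hpre : Pre_part1 t) (x y : String) (hxy : x < y) :
    (x, y) ∈ (bSt t).1 ↔ y ∈ NB (buildD t) x := by
  rw [mem_NB_build t hpre]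
  unfold bSt
  rw [mem_bE_foldl _ _ (edgesOf_shape t hpre)]
  constructor
  · rintro (h | ⟨e, he, a, b, rfl, hp⟩)
    · simp [PySem.Set.empty] at h
    · by_cases hab : a < b
      · rw [if_pos hab] at hp
        exact ⟨[a, b], he, Or.inl (by simp_all [Prod.ext_iff])⟩
      · rw [if_neg hab] at hp
        exact ⟨[a, b], he, Or.inr (by simp_all [Prod.ext_iff])⟩
  · rintro ⟨e, he, h | h⟩
    · exact Or.inr ⟨e, he, x, y, h, by rw [if_pos hxy]⟩
    · exact Or.inr ⟨e, he, y, x, h, by rw [if_neg (asymm hxy)]⟩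

theorem mem_bV (t : String) (hpre : Pre_part1 t) (x : String) :
    x ∈ (bSt t).2 ↔ ∃ y, y ∈ NB (buildD t) x := by
  unfold bSt
  rw [mem_bV_foldl _ _ (edgesOf_shape t hpre)]
  constructor
  · rintro (h | ⟨e, he, a, b, rfl, hx | hx⟩)
    · simp [PySem.Set.empty] at h
    · exact ⟨b, (mem_NB_build t hpre x b).mpr ⟨[a, b], he, Or.inl (by rw [hx])⟩⟩
    · exact ⟨a, (mem_NB_build t hpre x a).mpr ⟨[a, b], he, Or.inr (by rw [hx])⟩⟩
  · rintro ⟨y, hy⟩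
    obtain ⟨e, he, h | h⟩ := (mem_NB_build t hpre x y).mp hy
    · exact Or.inr ⟨e, he, x, y, h, Or.inl rfl⟩
    · exact Or.inr ⟨e, he, y, x, h, Or.inr rfl⟩

theorem nodup_bV (t : String) : ((bSt t).2).Nodup := by
  unfold bSt
  generalize edgesOf t = es
  have : ∀ (st : PySem.Set (String × String) × PySem.Set String), st.2.Nodup →
      ((es.foldl bStep st).2).Nodup := by
    induction es with
    | nil => exact fun st h => h
    | cons e rest ih =>
        intro st h
        apply ih
        rcases e with _ | ⟨a, _ | ⟨b, _ | ⟨c, e⟩⟩⟩ <;> try exact h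
        exact PySem.Set.nodup_add _ _ (PySem.Set.nodup_add _ _ h)
  exact this _ (by simp [PySem.Set.empty])

-- ---- sort3 facts ----
theorem sort3_perm_eq (a b c a' b' c' : String)
    (hp : ([a, b, c] : List String).Perm [a', b', c']) : sort3 a b c = sort3 a' b' c' := by
  have hs : PySem.List.sorted [a, b, c] (fun x => x) = PySem.List.sorted [a', b', c'] (fun x => x) :=
    PySem.List.sorted_eq_sorted_of_perm _ _ (fun x => x) (fun _ _ h => h) hp
  have hl := PySem.List.length_sorted [a', b', c'] (fun x => x) false
  unfold sort3
  rw [hs]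
  rcases h : PySem.List.sorted [a', b', c'] (fun x => x) false with
      _ | ⟨x, _ | ⟨y, _ | ⟨z, _ | ⟨w, l⟩⟩⟩⟩ <;> rw [h] at hl <;>
    first
    | rfl
    | simp at hl

theorem sort3_self (x : String) : sort3 x x x = (x, x, x) := by
  unfold sort3
  rw [PySem.List.sorted_eq_self_of_pairwise [x, x, x] (fun x => x) (by simp)]

theorem sort3_parts (a b c : String) :
    [(sort3 a b c).1, (sort3 a b c).2.1, (sort3 a b c).2.2].Perm [a, b, c] := by
  have hp := PySem.List.sorted_perm [a, b, c] (fun x => x) false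
  have hl := PySem.List.length_sorted [a, b, c] (fun x => x) false
  unfold sort3
  rcases h : PySem.List.sorted [a, b, c] (fun x => x) false with
      _ | ⟨x, _ | ⟨y, _ | ⟨z, _ | ⟨w, l⟩⟩⟩⟩ <;>
    rw [h] at hp hl <;> simp_all

theorem sort3_le (a b c : String) :
    (sort3 a b c).1 ≤ (sort3 a b c).2.1 ∧ (sort3 a b c).2.1 ≤ (sort3 a b c).2.2 := by
  have hp := PySem.List.sorted_pairwise [a, b, c] (fun x => x)
  have hl := PySem.List.length_sorted [a, b, c] (fun x => x) false
  unfold sort3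
  rcases h : PySem.List.sorted [a, b, c] (fun x => x) false with
      _ | ⟨x, _ | ⟨y, _ | ⟨z, _ | ⟨w, l⟩⟩⟩⟩ <;>
    rw [h] at hp hl <;> simp_all

theorem sort3_of_sorted (a b c : String) (hab : a ≤ b) (hbc : b ≤ c) :
    sort3 a b c = (a, b, c) := by
  unfold sort3
  rw [PySem.List.sorted_eq_self_of_pairwise [a, b, c] (fun x => x)
    (by
      refine List.pairwise_cons.mpr ⟨?_, List.pairwise_cons.mpr ⟨?_,
        List.pairwise_cons.mpr ⟨fun y hy => absurd hy (List.not_mem_nil), List.Pairwise.nil⟩⟩⟩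
      · intro y hy
        rcases List.mem_cons.mp hy with rfl | hy
        · exact hab
        · rcases List.mem_cons.mp hy with rfl | hy
          · exact le_trans hab hbc
          · exact absurd hy (List.not_mem_nil)
      · intro y hy
        rcases List.mem_cons.mp hy with rfl | hy
        · exact hbc
        · exact absurd hy (List.not_mem_nil))]

-- sorted of a nodup list is strictly increasing
theorem sorted_lt_of_nodup (na : List String) (h : na.Nodup) :
    (PySem.List.sorted na (fun x => x) false).Pairwise (· < ·) := by
  have hle := PySem.List.sorted_pairwise na (fun x => x)
  have hnd : (PySem.List.sorted na (fun x => x) false).Nodup :=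
    ((PySem.List.sorted_perm na (fun x => x) false).nodup_iff).mpr h
  exact (hle.and hnd).imp (fun h => lt_of_le_of_ne h.1 h.2)

-- ---- membership and nodup of trips ----
theorem mem_tripsFrom (edge : PySem.Set (String × String)) (u : String) (rest : List String)
    (hs : rest.Pairwise (· < ·)) (x : String × String × String) :
    x ∈ tripsFrom edge u rest ↔
      ∃ v w, v ∈ rest ∧ w ∈ rest ∧ v < w ∧ PySem.Set.contains edge (u, v) = true ∧
        predB edge u v w = true ∧ x = (u, v, w) := by
  induction rest with
  | nil => simp [tripsFrom]
  | cons v rest ih =>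
      rw [List.pairwise_cons] at hs
      rw [tripsFrom]
      simp only [List.mem_append, ih hs.2]
      constructor
      · rintro (h | ⟨v', w', hv', hw', hlt, hc, hp, rfl⟩)
        · by_cases hcv : PySem.Set.contains edge (u, v) = true
          · rw [if_pos hcv] at h
            obtain ⟨w, hwf, rfl⟩ := List.mem_map.mp h
            obtain ⟨hw, hpw⟩ := List.mem_filter.mp hwf
            exact ⟨v, w, List.mem_cons_self, List.mem_cons_of_mem _ hw, hs.1 w hw, hcv, hpw, rfl⟩
          · rw [if_neg hcv] at h
            exact absurd h (List.not_mem_nil)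
        · exact ⟨v', w', List.mem_cons_of_mem _ hv', List.mem_cons_of_mem _ hw', hlt, hc, hp, rfl⟩
      · rintro ⟨v', w', hv', hw', hlt, hc, hp, rfl⟩
        rcases List.mem_cons.mp hv' with h1 | h1 <;> rcases List.mem_cons.mp hw' with h2 | h2
        · subst h1; subst h2; exact absurd hlt (lt_irrefl _)
        · subst h1
          left
          rw [if_pos hc]
          exact List.mem_map.mpr ⟨w', List.mem_filter.mpr ⟨h2, hp⟩, rfl⟩
        · subst h2
          exact absurd hlt (not_lt.mpr (le_of_lt (hs.1 v' h1)))
        · exact Or.inr ⟨v', w', h1, h2, hlt, hc, hp, rfl⟩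

theorem mem_trips (edge : PySem.Set (String × String)) (vs : List String)
    (hs : vs.Pairwise (· < ·)) (x : String × String × String) :
    x ∈ trips edge vs ↔
      ∃ u v w, u ∈ vs ∧ v ∈ vs ∧ w ∈ vs ∧ u < v ∧ v < w ∧
        PySem.Set.contains edge (u, v) = true ∧ predB edge u v w = true ∧ x = (u, v, w) := by
  induction vs with
  | nil => simp [trips]
  | cons u rest ih =>
      rw [List.pairwise_cons] at hs
      rw [trips]
      simp only [List.mem_append, mem_tripsFrom edge u rest hs.2, ih hs.2]
      constructor
      · rintro (⟨v, w, hv, hw, hlt, hc, hp, rfl⟩ | ⟨u', v, w, hu', hv, hw, h1, h2, hc, hp, rfl⟩)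
        · exact ⟨u, v, w, List.mem_cons_self, List.mem_cons_of_mem _ hv,
            List.mem_cons_of_mem _ hw, hs.1 v hv, hlt, hc, hp, rfl⟩
        · exact ⟨u', v, w, List.mem_cons_of_mem _ hu', List.mem_cons_of_mem _ hv,
            List.mem_cons_of_mem _ hw, h1, h2, hc, hp, rfl⟩
      · rintro ⟨u', v, w, hu', hv, hw, h1, h2, hc, hp, rfl⟩
        have hvr : v ∈ rest := by
          rcases List.mem_cons.mp hv with h | h
          · subst h
            rcases List.mem_cons.mp hu' with h' | h'
            · exact absurd h1 (by rw [h']; exact lt_irrefl _)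
            · exact absurd h1 (not_lt.mpr (le_of_lt (hs.1 u' h')))
          · exact h
        have hwr : w ∈ rest := by
          rcases List.mem_cons.mp hw with h | h
          · subst h
            exact absurd h2 (asymm (hs.1 v hvr))
          · exact h
        rcases List.mem_cons.mp hu' with h | h
        · subst h
          exact Or.inl ⟨v, w, hvr, hwr, h2, hc, hp, rfl⟩
        · exact Or.inr ⟨u', v, w, h, hvr, hwr, h1, h2, hc, hp, rfl⟩

theorem tripsFrom_shape (edge : PySem.Set (String × String)) (u : String) (rest : List String) :
    ∀ x ∈ tripsFrom edge u rest, x.1 = u ∧ x.2.1 ∈ rest := by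
  induction rest with
  | nil => simp [tripsFrom]
  | cons v rest ih =>
      intro x hx
      rw [tripsFrom, List.mem_append] at hx
      rcases hx with h | h
      · by_cases hcv : PySem.Set.contains edge (u, v) = true
        · rw [if_pos hcv] at h
          obtain ⟨w, _, rfl⟩ := List.mem_map.mp h
          exact ⟨rfl, List.mem_cons_self⟩
        · rw [if_neg hcv] at h
          exact absurd h (List.not_mem_nil)
      · obtain ⟨h1, h2⟩ := ih x h
        exact ⟨h1, List.mem_cons_of_mem _ h2⟩

theorem trips_shape (edge : PySem.Set (String × String)) (vs : List String) :
    ∀ x ∈ trips edge vs, x.1 ∈ vs := by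
  induction vs with
  | nil => simp [trips]
  | cons u rest ih =>
      intro x hx
      rw [trips, List.mem_append] at hx
      rcases hx with h | h
      · rw [(tripsFrom_shape edge u rest x h).1]
        exact List.mem_cons_self
      · exact List.mem_cons_of_mem _ (ih x h)

theorem nodup_tripsFrom (edge : PySem.Set (String × String)) (u : String) (rest : List String)
    (hs : rest.Pairwise (· < ·)) : (tripsFrom edge u rest).Nodup := by
  induction rest with
  | nil => simp [tripsFrom]
  | cons v rest ih =>
      rw [List.pairwise_cons] at hs
      rw [tripsFrom]
      apply List.Nodup.append
      · split
        · apply List.Nodup.map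
          · intro w w' hww'
            simpa [Prod.ext_iff] using hww'
          · exact List.Nodup.filter _ (hs.2.imp (fun h => ne_of_lt h))
        · exact List.nodup_nil
      · exact ih hs.2
      · intro x hx hx'
        have h2 := (tripsFrom_shape edge u rest x hx').2
        have h1 : x.2.1 = v := by
          split at hx
          · obtain ⟨w, _, rfl⟩ := List.mem_map.mp hx
            rfl
          · exact absurd hx (List.not_mem_nil)
        rw [h1] at h2
        exact absurd (hs.1 v h2) (lt_irrefl v)

theorem nodup_trips (edge : PySem.Set (String × String)) (vs : List String)
    (hs : vs.Pairwise (· < ·)) : (trips edge vs).Nodup := by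
  induction vs with
  | nil => simp [trips]
  | cons u rest ih =>
      rw [List.pairwise_cons] at hs
      rw [trips]
      apply List.Nodup.append (nodup_tripsFrom edge u rest hs.2) (ih hs.2)
      intro x hx hx'
      have h1 := (tripsFrom_shape edge u rest x hx).1
      have h2 := trips_shape edge rest x hx'
      rw [h1] at h2
      exact absurd (hs.1 u h2) (lt_irrefl u)

-- ---- D_ from a dangerous self-loop ----
theorem D_of_selfloop (t : String) (hpre : Pre_part1 t) (a b : String)
    (hts : PySem.Str.startswith a "t" = true)
    (hab : b ∈ NB (buildD t) a) (hbb : b ∈ NB (buildD t) b) :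
    D_part1 t := by
  obtain ⟨e, he, hor⟩ := (mem_NB_build t hpre b b).mp hbb
  have he' : e = [b, b] := by rcases hor with h | h <;> exact h
  obtain ⟨line, hline, hsp⟩ := List.mem_map.mp he
  obtain ⟨e2, he2, hor2⟩ := (mem_NB_build t hpre a b).mp hab
  obtain ⟨line2, hline2, hsp2⟩ := List.mem_map.mp he2
  subst he'
  refine ⟨(b, b), List.mem_map.mpr ⟨line, hline, by rw [hsp]; rfl⟩, rfl, ?_⟩
  by_cases htsb : pvT b
  · left
    exact htsb
  · right
    rcases hor2 with h | h
    · refine ⟨(a, b), List.mem_map.mpr ⟨line2, hline2, by rw [hsp2, h]; rfl⟩, ?_⟩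
      right
      exact ⟨rfl, hts⟩
    · refine ⟨(b, a), List.mem_map.mpr ⟨line2, hline2, by rw [hsp2, h]; rfl⟩, ?_⟩
      left
      exact ⟨rfl, hts⟩

-- ---- characterization of candA ----
theorem mem_candA_of (t : String) (a b c : String) (hts : tsb a = true)
    (hb : b ∈ NB (buildD t) a) (hcb : c ∈ NB (buildD t) b) (hca : c ∈ NB (buildD t) a) :
    sort3 a b c ∈ candA (buildD t) := by
  unfold candA
  apply List.mem_flatMap.mpr
  refine ⟨(a, NB (buildD t) a), mem_items_of_NB t hb, ?_⟩
  unfold genA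
  rw [if_pos hts]
  exact List.mem_flatMap.mpr ⟨b, hb,
    List.mem_map.mpr ⟨c, (PySem.Set.mem_inter _ _ _).mpr ⟨hcb, hca⟩, rfl⟩⟩

theorem mem_candA_iff (t : String) (x : String × String × String) :
    x ∈ candA (buildD t) ↔
      ∃ a b c, tsb a = true ∧ b ∈ NB (buildD t) a ∧ c ∈ NB (buildD t) b ∧
        c ∈ NB (buildD t) a ∧ x = sort3 a b c := by
  constructor
  · intro h
    unfold candA at h
    obtain ⟨⟨a, na⟩, hp, hx⟩ := List.mem_flatMap.mp h
    have hna : na = NB (buildD t) a := items_val t hp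
    unfold genA at hx
    by_cases hts : tsb a = true
    · rw [if_pos hts] at hx
      obtain ⟨b, hb, hmap⟩ := List.mem_flatMap.mp hx
      obtain ⟨c, hcmem, rfl⟩ := List.mem_map.mp hmap
      obtain ⟨hcb, hcna⟩ := (PySem.Set.mem_inter _ _ _).mp hcmem
      exact ⟨a, b, c, hts, hna ▸ hb, hcb, hna ▸ hcna, rfl⟩
    · rw [if_neg hts] at hx
      exact absurd hx (List.not_mem_nil)
  · rintro ⟨a, b, c, hts, hb, hcb, hca, rfl⟩
    exact mem_candA_of t a b c hts hb hcb hca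

-- ---- trips ⊆ candA (always, under Pre_) and candA ⊆ trips (outside D_) ----
theorem bvs_pairwise (t : String) :
    (PySem.List.sorted (bSt t).2 (fun x => x) false).Pairwise (· < ·) :=
  sorted_lt_of_nodup _ (nodup_bV t)

theorem trips_sub_candA (t : String) (hpre : Pre_part1 t) (x : String × String × String)
    (h : x ∈ trips (bSt t).1 (PySem.List.sorted (bSt t).2 (fun x => x) false)) :
    x ∈ candA (buildD t) := by
  obtain ⟨u, v, w, _, _, _, huv, hvw, hc, hp, rfl⟩ :=
    (mem_trips _ _ (bvs_pairwise t) x).mp h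
  have huw : u < w := lt_trans huv hvw
  have hNuv : v ∈ NB (buildD t) u :=
    (mem_bE_lt t hpre u v huv).mp ((PySem.Set.contains_iff _ _).mp hc)
  unfold predB at hp
  rw [Bool.and_eq_true, Bool.and_eq_true] at hp
  obtain ⟨⟨hcuw, hcvw⟩, htsb⟩ := hp
  have hNuw : w ∈ NB (buildD t) u :=
    (mem_bE_lt t hpre u w huw).mp ((PySem.Set.contains_iff _ _).mp hcuw)
  have hNvw : w ∈ NB (buildD t) v :=
    (mem_bE_lt t hpre v w hvw).mp ((PySem.Set.contains_iff _ _).mp hcvw)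
  apply (mem_candA_iff t _).mpr
  have hts3 : PySem.Str.startswith u "t" = true ∨ PySem.Str.startswith v "t" = true ∨
      PySem.Str.startswith w "t" = true := by
    rw [Bool.or_eq_true, Bool.or_eq_true] at htsb
    tauto
  rcases hts3 with hts | hts | hts
  · exact ⟨u, v, w, hts, hNuv, hNvw, hNuw,
      (sort3_of_sorted u v w (le_of_lt huv) (le_of_lt hvw)).symm⟩
  · refine ⟨v, u, w, hts, NB_symm t hpre u v hNuv, hNuw, hNvw, ?_⟩
    rw [sort3_perm_eq v u w u v w (List.Perm.swap u v [w]),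
      sort3_of_sorted u v w (le_of_lt huv) (le_of_lt hvw)]
  · refine ⟨w, u, v, hts, NB_symm t hpre u w hNuw, hNuv, NB_symm t hpre v w hNvw, ?_⟩
    rw [sort3_perm_eq w u v u v w (List.perm_append_comm (l₁ := [w]) (l₂ := [u, v])),
      sort3_of_sorted u v w (le_of_lt huv) (le_of_lt hvw)]

theorem candA_sub_trips (t : String) (hpre : Pre_part1 t) (hD : ¬ D_part1 t)
    (x : String × String × String) (h : x ∈ candA (buildD t)) :
    x ∈ trips (bSt t).1 (PySem.List.sorted (bSt t).2 (fun x => x) false) := by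
  obtain ⟨a, b, c, hts, hb, hcb, hca, rfl⟩ := (mem_candA_iff t _).mp h
  -- a, b, c are pairwise distinct outside D_
  have hba : b ≠ a := by
    intro h
    rw [h] at hb
    exact hD (D_of_selfloop t hpre a a hts hb hb)
  have hcaeq : c ≠ a := by
    intro h
    rw [h] at hca
    exact hD (D_of_selfloop t hpre a a hts hca hca)
  have hcbeq : c ≠ b := by
    intro h
    rw [h] at hcb
    exact hD (D_of_selfloop t hpre a b hts hb hcb)
  have hadj : ∀ p q : String, p ∈ ([a, b, c] : List String) → q ∈ ([a, b, c] : List String) →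
      p ≠ q → q ∈ NB (buildD t) p := by
    intro p q hp hq hpq
    simp only [List.mem_cons, List.not_mem_nil, or_false] at hp hq
    rcases hp with rfl | rfl | rfl <;> rcases hq with rfl | rfl | rfl <;>
      first
      | exact absurd rfl hpq
      | exact hb
      | exact hca
      | exact hcb
      | exact NB_symm t hpre _ _ hb
      | exact NB_symm t hpre _ _ hca
      | exact NB_symm t hpre _ _ hcb
  rcases hsrt : sort3 a b c with ⟨u, v, w⟩
  have hperm : ([u, v, w] : List String).Perm [a, b, c] := by
    have := sort3_parts a b c
    rwa [hsrt] at this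
  have hle := sort3_le a b c
  rw [hsrt] at hle
  have hnd : ([u, v, w] : List String).Nodup := by
    rw [hperm.nodup_iff]
    simp [Ne.symm hba, Ne.symm hcaeq, Ne.symm hcbeq]
  have huv : u < v := lt_of_le_of_ne hle.1 (by simp at hnd; exact hnd.1.1)
  have hvw : v < w := lt_of_le_of_ne hle.2 (by simp at hnd; exact hnd.2)
  have huw : u < w := lt_trans huv hvw
  have hmem : ∀ p : String, p ∈ ([u, v, w] : List String) → p ∈ ([a, b, c] : List String) :=
    fun p hp => hperm.subset hp
  have hNuv : v ∈ NB (buildD t) u :=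
    hadj u v (hmem u (by simp)) (hmem v (by simp)) (ne_of_lt huv)
  have hNuw : w ∈ NB (buildD t) u :=
    hadj u w (hmem u (by simp)) (hmem w (by simp)) (ne_of_lt huw)
  have hNvw : w ∈ NB (buildD t) v :=
    hadj v w (hmem v (by simp)) (hmem w (by simp)) (ne_of_lt hvw)
  have hmemV : ∀ p q : String, q ∈ NB (buildD t) p →
      p ∈ PySem.List.sorted (bSt t).2 (fun x => x) false := by
    intro p q hq
    rw [PySem.List.mem_sorted, mem_bV t hpre]
    exact ⟨q, hq⟩
  apply (mem_trips _ _ (bvs_pairwise t) _).mpr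
  refine ⟨u, v, w, hmemV u v hNuv, hmemV v u (NB_symm t hpre u v hNuv),
    hmemV w u (NB_symm t hpre u w hNuw), huv, hvw,
    (PySem.Set.contains_iff _ _).mpr ((mem_bE_lt t hpre u v huv).mpr hNuv), ?_, rfl⟩
  have hta : PySem.Str.startswith u "t" = true ∨ PySem.Str.startswith v "t" = true ∨
      PySem.Str.startswith w "t" = true := by
    have ha : a ∈ ([u, v, w] : List String) := hperm.symm.subset (by simp)
    simp only [List.mem_cons, List.not_mem_nil, or_false] at ha
    rcases ha with rfl | rfl | rfl
    · exact Or.inl hts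
    · exact Or.inr (Or.inl hts)
    · exact Or.inr (Or.inr hts)
  unfold predB
  rw [Bool.and_eq_true, Bool.and_eq_true]
  refine ⟨⟨(PySem.Set.contains_iff _ _).mpr ((mem_bE_lt t hpre u w huw).mpr hNuw),
    (PySem.Set.contains_iff _ _).mpr ((mem_bE_lt t hpre v w hvw).mpr hNvw)⟩, ?_⟩
  rw [Bool.or_eq_true, Bool.or_eq_true]
  tauto

-- A's set strictly exceeds B's list when candA holds an element outside trips
theorem ne_of_extra (t : String) (hpre : Pre_part1 t) (t0 : String × String × String)
    (hA : t0 ∈ candA (buildD t))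
    (hB : t0 ∉ trips (bSt t).1 (PySem.List.sorted (bSt t).2 (fun x => x) false)) :
    part1 t ≠ part1_alt t := by
  rw [part1_eq, part1_alt_eq]
  have hsub : (trips (bSt t).1 (PySem.List.sorted (bSt t).2 (fun x => x) false)).toFinset ⊆
      (PySem.Set.ofList (candA (buildD t))).toFinset := by
    intro y hy
    rw [List.mem_toFinset] at hy
    rw [List.mem_toFinset, PySem.Set.mem_ofList]
    exact trips_sub_candA t hpre y hy
  have hss := (Finset.ssubset_iff_of_subset hsub).mpr
    ⟨t0, by rw [List.mem_toFinset, PySem.Set.mem_ofList]; exact hA,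
      by rw [List.mem_toFinset]; exact hB⟩
  have hcard := Finset.card_lt_card hss
  rw [List.toFinset_card_of_nodup (PySem.Set.nodup_ofList _),
    List.toFinset_card_of_nodup (nodup_trips _ _ (bvs_pairwise t))] at hcard
  intro hcontra
  have := Nat.cast_inj (R := Int) |>.mp hcontra
  omega

-- every trips element has three strictly increasing (hence distinct) components
theorem trips_strict (t : String) (x : String × String × String)
    (h : x ∈ trips (bSt t).1 (PySem.List.sorted (bSt t).2 (fun x => x) false)) :
    x.1 < x.2.1 ∧ x.2.1 < x.2.2 := by
  obtain ⟨u, v, w, _, _, _, huv, hvw, _, _, rfl⟩ :=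
    (mem_trips _ _ (bvs_pairwise t) x).mp h
  exact ⟨huv, hvw⟩

theorem two_parts (l : List String) (hlen : l.length = 2) : ∃ u v, l = [u, v] := by
  rcases l with _ | ⟨u, _ | ⟨v, _ | ⟨w, l⟩⟩⟩ <;> simp_all

-- ===== VERDICT (by name: the statement is the Claim_ definition above) =====
theorem part1_spec : Claim_unchanged_part1 := by
  intro t _ hpre hD
  rw [part1_eq, part1_alt_eq]
  congr 1
  apply List.Perm.length_eq
  rw [List.perm_ext_iff_of_nodup (PySem.Set.nodup_ofList _)
    (nodup_trips _ _ (bvs_pairwise t))]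
  intro x
  rw [PySem.Set.mem_ofList]
  exact ⟨candA_sub_trips t hpre hD x, trips_sub_candA t hpre x⟩

theorem part1_changed : Claim_changed_part1 := by unfold Claim_changed_part1; decide

theorem part1_tight : Claim_exact_part1 := by
  intro t _ hpre hd
  obtain ⟨e, he, heq, hcl⟩ := hd
  obtain ⟨line, hline, hpair⟩ := List.mem_map.mp he
  obtain ⟨u, v, huv⟩ := two_parts _ (hpre line hline)
  rw [huv] at hpair
  have hv : u = v := by
    have h1 : u = e.1 := by rw [← hpair]; rfl
    have h2 : v = e.2 := by rw [← hpair]; rfl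
    rw [h1, h2, heq]
  subst hv
  have hxx : u ∈ NB (buildD t) u := (mem_NB_build t hpre u u).mpr
    ⟨[u, u], List.mem_map.mpr ⟨line, hline, huv⟩, Or.inl rfl⟩
  rw [← hpair] at hcl
  by_cases htsu : PySem.Str.startswith u "t" = true
  · -- A additionally counts the degenerate triangle (u, u, u)
    apply ne_of_extra t hpre (u, u, u)
    · have := mem_candA_of t u u u htsu hxx hxx hxx
      rwa [sort3_self] at this
    · intro h
      exact absurd (trips_strict t _ h).1 (lt_irrefl u)
  · -- the self-loop node u is adjacent to some t-node a ≠ u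
    rcases hcl with h | ⟨f, hf, hcase⟩
    · exact absurd h htsu
    · obtain ⟨line2, hline2, hpair2⟩ := List.mem_map.mp hf
      obtain ⟨p, q, hpq⟩ := two_parts _ (hpre line2 hline2)
      rw [hpq] at hpair2
      rw [← hpair2] at hcase
      simp only [List.getD_cons_zero, List.getD_cons_succ] at hcase
      obtain ⟨a, hts_a, hua⟩ : ∃ a, PySem.Str.startswith a "t" = true ∧ u ∈ NB (buildD t) a := by
        rcases hcase with ⟨hpu, htq⟩ | ⟨hqu, htp⟩
        · exact ⟨q, htq, (mem_NB_build t hpre q u).mpr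
            ⟨[p, q], List.mem_map.mpr ⟨line2, hline2, hpq⟩, Or.inr (by rw [hpu])⟩⟩
        · exact ⟨p, htp, (mem_NB_build t hpre p u).mpr
            ⟨[p, q], List.mem_map.mpr ⟨line2, hline2, hpq⟩, Or.inl (by rw [hqu])⟩⟩
      apply ne_of_extra t hpre (sort3 a u u)
      · exact mem_candA_of t a u u hts_a hua hxx hua
      · intro h
        obtain ⟨h1, h2⟩ := trips_strict t _ h
        have hperm := sort3_parts a u u
        have hnd : ([(sort3 a u u).1, (sort3 a u u).2.1, (sort3 a u u).2.2] :
            List String).Nodup := by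
          simp only [List.nodup_cons, List.mem_cons, List.not_mem_nil, or_false,
            List.nodup_nil, and_true, not_or]
          exact ⟨⟨ne_of_lt h1, ne_of_lt (lt_trans h1 h2)⟩, ne_of_lt h2, not_false⟩
        have hcontra : ([a, u, u] : List String).Nodup := hperm.nodup_iff.mp hnd
        simp at hcontra
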